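-- pv_equiv track=rewrite | github.com/AdamMeyers/The_Termolator | chinese_noun_chunker_generator.py | detect_noun
-- ===== SOURCE A (Python) =====
-- def detect_noun(pair_list):
--     result = [] # information stored in the format of [word, tag, BIO_tag]
--     for i in range (len(pair_list)):
--
--         if is_noun(pair_list[i][1]): # detect the noun first
--             if i == 0: # The first of the word is 0
--                 result.append([pair_list[i][0], pair_list[i][1], 'B-NP'])
--             elif i > 0 and is_inword(result[i - 1][2]) == True: # check if the previous word is in_word
--                 result.append([pair_list[i][0], pair_list[i][1], 'I-NP'])
--             else: # if this noun is the start, then it will be in_word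
--                 result.append([pair_list[i][0], pair_list[i][1], 'B-NP'])
--         elif is_adj(pair_list[i][1]): # if an adj is detected, then it will be the start of the term
--             if i > 0 and is_inword(result[i - 1][2]): # check if the previous word is in_word
--                 result.append([pair_list[i][0], pair_list[i][1], 'I-NP'])
--             else:
--                 result.append([pair_list[i][0], pair_list[i][1], 'B-NP'])
--         else:
--             result.append([pair_list[i][0], pair_list[i][1], 'O'])
--     return result
--
-- def is_inword(BIOtag):
--     inword_tag_set = set(['B-NP', 'I-NP'])
--     if BIOtag in inword_tag_set:
--         return True
--     else:
--         return False
--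
-- def is_adj(tag):
--     adj_tag_set = set(["JJ", "JJS", "JJR"])
--     return True if tag in adj_tag_set else False
--
-- def is_noun(tag):
--     noun_tag_set = set(["NN", "NP"])
--     return True if tag in noun_tag_set else False
-- ===== SOURCE B (Python) =====
-- def is_adj(tag):
--     adj_tag_set = set(["JJ", "JJS", "JJR"])
--     return True if tag in adj_tag_set else False
--
-- def is_noun(tag):
--     noun_tag_set = set(["NN", "NP"])
--     return True if tag in noun_tag_set else False
--
-- def detect_noun(pair_list):
--     # Run-segmentation: cut the list into maximal runs of equal chunk-materiality
--     # (noun-or-adjective vs other) and label each run wholesale.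
--     n = len(pair_list)
--     result = []
--     i = 0
--     while i < n:
--         mark = is_noun(pair_list[i][1]) or is_adj(pair_list[i][1])
--         j = i + 1
--         while j < n and (is_noun(pair_list[j][1]) or is_adj(pair_list[j][1])) == mark:
--             j += 1
--         if mark:
--             labels = ['B-NP'] + ['I-NP'] * (j - i - 1)
--         else:
--             labels = ['O'] * (j - i)
--         for p, lab in zip(pair_list[i:j], labels):
--             result.append([p[0], p[1], lab])
--         i = j
--     return result
-- ===== Notes on version B (the rewrite author's own statement) =====
-- stated objective: alternative
-- what changed: Segments the input into maximal runs of equal chunk-materiality (noun-or-adjective vs other) and labels each run wholesale ('B-NP' followed by 'I-NP's for a chunk run, all 'O' otherwise), instead of A's per-token pass that reads the previous BIO tag back out of result[i-1][2].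
import Mathlib
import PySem

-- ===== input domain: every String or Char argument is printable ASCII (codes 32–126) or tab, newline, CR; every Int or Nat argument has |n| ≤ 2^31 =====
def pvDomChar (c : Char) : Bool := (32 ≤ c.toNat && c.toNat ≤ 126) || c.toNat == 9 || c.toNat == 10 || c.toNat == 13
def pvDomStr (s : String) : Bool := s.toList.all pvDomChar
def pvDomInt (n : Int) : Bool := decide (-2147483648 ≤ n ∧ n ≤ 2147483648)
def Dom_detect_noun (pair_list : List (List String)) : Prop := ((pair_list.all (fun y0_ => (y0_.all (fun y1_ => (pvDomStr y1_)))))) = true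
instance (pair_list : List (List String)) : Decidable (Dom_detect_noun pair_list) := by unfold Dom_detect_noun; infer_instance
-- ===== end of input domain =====

-- B labels maximal runs of chunk-material tokens wholesale instead of A's per-token pass reading back result[i-1][2]; same cost, different decomposition. Return-value equivalence on inputs whose inner lists have length ≥ 2 (elsewhere both raise IndexError).


-- ===== PORT A =====
def isInword (t : String) : Bool := t == "B-NP" || t == "I-NP"
def isAdj (t : String) : Bool := t == "JJ" || t == "JJS" || t == "JJR"
def isNoun (t : String) : Bool := t == "NN" || t == "NP"

-- the 'for i in range(len(pair_list))' loop of A, with its growing 'result' list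
def detectLoopA (pl : List (List String)) (i : Nat) (result : List (List String)) : List (List String) :=
  if i < pl.length then
    let p := pl.getD i []
    let word := p.getD 0 ""
    let tag := p.getD 1 ""
    let entry :=
      if isNoun tag then
        if i = 0 then [word, tag, "B-NP"]
        else if decide (0 < i) && isInword ((result.getD (i-1) []).getD 2 "") then [word, tag, "I-NP"]
        else [word, tag, "B-NP"]
      else if isAdj tag then
        if decide (0 < i) && isInword ((result.getD (i-1) []).getD 2 "") then [word, tag, "I-NP"]
        else [word, tag, "B-NP"]
      else [word, tag, "O"]
    detectLoopA pl (i+1) (result ++ [entry])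
  else result
termination_by pl.length - i

def detect_noun (pair_list : List (List String)) : List (List String) :=
  detectLoopA pair_list 0 []

-- ===== PORT B =====
def chunkMark (p : List String) : Bool := isNoun (p.getD 1 "") || isAdj (p.getD 1 "")

-- the labels B builds for one maximal run of length k and materiality m
def runLabels (m : Bool) (k : Nat) : List String :=
  if m then "B-NP" :: List.replicate (k - 1) "I-NP" else List.replicate k "O"

-- Source B's outer while loop: peel off one maximal run at a time (inner 'while j' = takeWhile)
def detectRuns (ps : List (List String)) : List (List String) :=
  match ps with
  | [] => []
  | p :: rest =>
    let m := chunkMark p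
    let run := p :: rest.takeWhile (fun q => chunkMark q == m)
    let rest' := rest.dropWhile (fun q => chunkMark q == m)
    (run.zip (runLabels m run.length)).map
      (fun ql => [ql.1.getD 0 "", ql.1.getD 1 "", ql.2]) ++ detectRuns rest'
termination_by ps.length
decreasing_by
  simp only [List.length_cons]
  exact Nat.lt_succ_of_le (List.length_dropWhile_le _ _)

def detect_noun_alt (pair_list : List (List String)) : List (List String) :=
  detectRuns pair_list

-- ===== PRECONDITION & SPEC =====
-- Pre_ excludes exactly the inputs on which the Python A raises IndexError: an inner list shorter than 2 (pair_list[i][1]).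
def Pre_detect_noun (pair_list : List (List String)) : Prop :=
  ∀ p ∈ pair_list, 2 ≤ p.length
instance (pair_list : List (List String)) : Decidable (Pre_detect_noun pair_list) := by unfold Pre_detect_noun; infer_instance

def pvWitness_detect_noun : List (List String) :=
  [["the", "DT"], ["big", "JJ"], ["dog", "NN"]]

def Spec_detect_noun (pair_list : List (List String)) (out : List (List String)) : Prop := out = detect_noun_alt pair_list
instance (pair_list : List (List String)) (out : List (List String)) : Decidable (Spec_detect_noun pair_list out) := by unfold Spec_detect_noun; infer_instance

-- ===== CLAIM (what is proved, stated in full; the proofs are below) =====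
def Claim_equal_detect_noun : Prop := ∀ (pair_list : List (List String)), Dom_detect_noun pair_list → Pre_detect_noun pair_list → Spec_detect_noun pair_list (detect_noun pair_list)

-- ===== LEMMAS AND PROOFS =====

-- reference labeling: structural recursion carrying the previous token's materiality
def bioList : List (List String) → Bool → List (List String)
  | [], _ => []
  | p :: rest, prev =>
    [p.getD 0 "", p.getD 1 "",
     if chunkMark p then (if prev then "I-NP" else "B-NP") else "O"] :: bioList rest (chunkMark p)

theorem loopA_eq (pl : List (List String)) :
    ∀ (i : Nat) (result : List (List String)), result.length = i →
    detectLoopA pl i result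
      = result ++ bioList (pl.drop i) (isInword ((result.getD (i-1) []).getD 2 "")) := by
  intro i
  induction hn : pl.length - i using Nat.strong_induction_on generalizing i with
  | _ n ih =>
    intro result hlen
    rw [detectLoopA]
    by_cases hi : i < pl.length
    · simp only [hi, if_true]
      have hdrop : pl.drop i = pl[i] :: pl.drop (i + 1) := List.drop_eq_getElem_cons hi
      have hget : pl.getD i [] = pl[i] := List.getD_eq_getElem pl [] hi
      have hrec := ih (pl.length - (i+1)) (by omega) (i+1) rfl
      set p := pl[i] with hp
      set tag := p.getD 1 "" with htag
      have hprev0 : i = 0 → isInword ((result.getD (i-1) []).getD 2 "") = false := by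
        intro h0
        have : result = [] := List.eq_nil_of_length_eq_zero (by omega)
        subst this; simp [h0, isInword]
      set prev := isInword ((result.getD (i-1) []).getD 2 "") with hprevdef
      have hcm : chunkMark p = (isNoun tag || isAdj tag) := by
        simp [chunkMark, htag, List.getD]
      have hentry :
          (if isNoun tag then
            if i = 0 then [p.getD 0 "", tag, "B-NP"]
            else if decide (0 < i) && prev then [p.getD 0 "", tag, "I-NP"]
            else [p.getD 0 "", tag, "B-NP"]
          else if isAdj tag then
            if decide (0 < i) && prev then [p.getD 0 "", tag, "I-NP"]
            else [p.getD 0 "", tag, "B-NP"]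
          else [p.getD 0 "", tag, "O"])
          = [p.getD 0 "", tag, if chunkMark p then (if prev then "I-NP" else "B-NP") else "O"] := by
        rw [hcm]
        by_cases h0 : i = 0
        · cases hN : isNoun tag <;> cases hA : isAdj tag <;> simp [h0, hprev0 h0]
        · cases hN : isNoun tag <;> cases hA : isAdj tag <;>
            simp [h0, Nat.pos_of_ne_zero h0] <;> split <;> simp_all
      rw [hget, hentry]
      set entry := [p.getD 0 "", tag, if chunkMark p then (if prev then "I-NP" else "B-NP") else "O"] with hent
      rw [hrec (result ++ [entry]) (by simp [hlen])]
      have hlast : (result ++ [entry]).getD (i + 1 - 1) [] = entry := by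
        simp only [Nat.add_sub_cancel, ← hlen]
        rw [List.getD, List.getElem?_concat_length]; rfl
      have hflag : isInword ((( result ++ [entry]).getD (i+1-1) []).getD 2 "") = chunkMark p := by
        rw [hlast, hent]
        cases hm : chunkMark p <;> cases hP : prev <;> simp [isInword]
      rw [hflag, hdrop, bioList]
      simp [hent, htag, List.getD]
    · simp only [hi, if_false]
      rw [List.drop_eq_nil_of_le (by omega), bioList]
      simp

-- zipping a list with a constant replicate is a map
theorem zip_replicate_map (l : List (List String)) (c : String) :
    ((l.zip (List.replicate l.length c)).map
      (fun ql => [ql.1.getD 0 "", ql.1.getD 1 "", ql.2]))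
    = l.map (fun q => [q.getD 0 "", q.getD 1 "", c]) := by
  induction l with
  | nil => rfl
  | cons q l ih =>
    simp only [List.length_cons, List.replicate_succ, List.zip_cons_cons, List.map_cons]
    rw [ih]

-- inside a run whose materiality equals prev, every label is I-NP (if material) or O
theorem bioList_run (run tail : List (List String)) (m : Bool)
    (h : ∀ q ∈ run, chunkMark q = m) :
    bioList (run ++ tail) m
      = run.map (fun q => [q.getD 0 "", q.getD 1 "", if m then "I-NP" else "O"]) ++ bioList tail m := by
  induction run with
  | nil => rfl
  | cons q run ih =>
    have hq : chunkMark q = m := h q (List.mem_cons_self ..)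
    simp only [List.cons_append, bioList, hq, List.map_cons, List.cons_append]
    rw [ih (fun x hx => h x (List.mem_cons_of_mem _ hx))]
    cases m <;> simp

theorem detectRuns_eq_bioList :
    ∀ (n : Nat) (ps : List (List String)) (prev : Bool), ps.length ≤ n →
    (∀ p rest, ps = p :: rest → chunkMark p = true → prev = false) →
    detectRuns ps = bioList ps prev := by
  intro n
  induction n with
  | zero =>
    intro ps prev hlen _
    have : ps = [] := List.eq_nil_of_length_eq_zero (by omega)
    subst this; simp [detectRuns, bioList]
  | succ n ih =>
    intro ps prev hlen hhd
    match ps with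
    | [] => simp [detectRuns, bioList]
    | p :: rest =>
      rw [detectRuns]
      set m := chunkMark p with hm
      set run := rest.takeWhile (fun q => chunkMark q == m) with hrun
      set rest' := rest.dropWhile (fun q => chunkMark q == m) with hrest'
      have hsplit : rest = run ++ rest' := (List.takeWhile_append_dropWhile).symm
      have hrunall : ∀ q ∈ run, chunkMark q = m := by
        intro q hq
        have := List.mem_takeWhile_imp hq
        simpa using this
      have hprev : m = true → prev = false := hhd p rest rfl
      -- RHS: first entry, then the run, then the tail
      have hbio : bioList (p :: rest) prev
          = [p.getD 0 "", p.getD 1 "", if m then "B-NP" else "O"]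
            :: (run.map (fun q => [q.getD 0 "", q.getD 1 "", if m then "I-NP" else "O"])
                ++ bioList rest' m) := by
        rw [bioList, ← hm]
        have h1 : (if m then (if prev then "I-NP" else "B-NP") else "O")
            = (if m then "B-NP" else "O") := by
          cases hmm : m
          · rfl
          · rw [hprev hmm]; simp
        rw [h1]
        congr 1
        rw [hsplit] at *
        exact bioList_run run rest' m hrunall
      rw [hbio]
      -- LHS
      have hrec : detectRuns rest' = bioList rest' m := by
        apply ih rest' m
        · have h1 : rest'.length ≤ rest.length := List.length_dropWhile_le _ _
          simp only [List.length_cons] at hlen; omega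
        · intro p' rest'' heq hcp'
          have : ¬ (chunkMark p' == m) = true := by
            have := List.head?_dropWhile_not (fun q => chunkMark q == m) rest
            rw [← hrest', heq] at this
            simpa using this
          cases hmm : m
          · rfl
          · exfalso; rw [hcp', hmm] at this; exact this rfl
      rw [hrec]
      have hlabels : runLabels m (run.length + 1)
          = (if m then "B-NP" else "O") :: List.replicate run.length (if m then "I-NP" else "O") := by
        cases m <;> simp [runLabels, List.replicate_succ]
      simp only [List.length_cons, hlabels, List.zip_cons_cons, List.map_cons]
      rw [zip_replicate_map]
      simp

-- ===== VERDICT (by name: the statement is the Claim_ definition above) =====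
theorem detect_noun_spec : Claim_equal_detect_noun := by
  intro pl _ _
  unfold Spec_detect_noun detect_noun detect_noun_alt
  rw [loopA_eq pl 0 [] rfl,
      detectRuns_eq_bioList pl.length pl false (le_refl _) (fun _ _ _ _ => rfl)]
  simp [isInword]
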